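-- pv_equiv track=rewrite | github.com/danielgonzagat/act | atos_core/cognitive_composition_v161.py | merge_max
-- ===== SOURCE A (Python) =====
-- from typing import Any, Callable, Dict, List, Optional, Set, Tuple, Union
--
-- GridV124 = List[List[int]]
--
-- def _grid_shape_v161(g: GridV124) -> Tuple[int, int]:
--     """Get (height, width) of grid."""
--     if not g:
--         return (0, 0)
--     return (len(g), len(g[0]) if g[0] else 0)
--
-- def _new_grid_v161(rows: int, cols: int, fill: int = 0) -> GridV124:
--     """Create a new grid with given dimensions."""
--     return [[int(fill) for _ in range(int(cols))] for _ in range(int(rows))]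
--
-- def merge_max(grids: List[GridV124]) -> GridV124:
--     """Merge grids by taking maximum value at each cell."""
--     if not grids:
--         return [[]]
--
--     h, w = _grid_shape_v161(grids[0])
--     result = _new_grid_v161(h, w, 0)
--
--     for r in range(h):
--         for c in range(w):
--             vals = [int(g[r][c]) for g in grids if r < len(g) and c < len(g[0])]
--             result[r][c] = max(vals) if vals else 0
--
--     return result
-- ===== SOURCE B (Python) =====
-- def merge_max(grids):
--     """Merge grids by taking maximum value at each cell (grid-outer running max)."""
--     if not grids:
--         return [[]]
--     g0 = grids[0]
--     h = len(g0)
--     w = (len(g0[0]) if g0[0] else 0) if g0 else 0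
--     best = [[None] * w for _ in range(h)]
--     for g in grids:
--         rows = min(h, len(g))
--         cols = min(w, len(g[0]) if g else 0)
--         for r in range(rows):
--             row = g[r]
--             brow = best[r]
--             for c in range(cols):
--                 v = int(row[c])
--                 old = brow[c]
--                 if old is None or v > old:
--                     brow[c] = v
--     return [[0 if x is None else x for x in row] for row in best]
-- ===== Notes on version B (the rewrite author's own statement) =====
-- stated objective: faster
-- what changed: Cell-outer collection of a per-cell value list with max() is replaced by a grid-outer single sweep maintaining a running maximum per cell (None = not yet covered), so no per-cell Python list is built and max() is never called.
import Mathlib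
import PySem

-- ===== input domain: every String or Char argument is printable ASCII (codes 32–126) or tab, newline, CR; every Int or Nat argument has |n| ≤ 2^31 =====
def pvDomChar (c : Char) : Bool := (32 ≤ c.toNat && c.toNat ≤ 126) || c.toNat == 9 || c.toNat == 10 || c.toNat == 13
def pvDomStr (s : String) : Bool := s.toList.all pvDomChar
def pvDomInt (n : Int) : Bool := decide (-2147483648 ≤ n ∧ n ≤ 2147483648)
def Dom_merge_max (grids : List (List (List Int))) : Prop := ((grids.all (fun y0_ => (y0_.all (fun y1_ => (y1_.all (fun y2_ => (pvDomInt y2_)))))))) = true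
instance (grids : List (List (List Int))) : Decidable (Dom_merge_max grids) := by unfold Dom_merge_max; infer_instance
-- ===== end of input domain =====

-- B replaces A's cell-outer `max(list)`-per-cell pass by one grid-outer sweep keeping a
-- running maximum per cell (None = not yet covered): no per-cell list/max() call
-- (constant-factor speedup measured); same results.

-- ===== PORT A =====
-- helper: _grid_shape_v161 (for nonempty g, `len(g[0]) if g[0] else 0` equals g[0].length)
def gridShapeV161 (g : List (List Int)) : Nat × Nat :=
  match g with
  | [] => (0, 0)
  | r0 :: _ => (g.length, r0.length)

-- helper: _new_grid_v161 (nested comprehension over ranges)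
def newGridV161 (rows cols : Nat) (fill : Int) : List (List Int) :=
  (List.range rows).map (fun _ => (List.range cols).map (fun _ => fill))

-- `r < len(g) and c < len(g[0])`: Python short-circuits, so g[0] is only read when
-- 0 < len(g); for g = [] the Lean `headD []` gives length 0 and the conjunct is false too.
def merge_max (grids : List (List (List Int))) : List (List Int) :=
  match grids with
  | [] => [[]]
  | g0 :: _ =>
    let hw := gridShapeV161 g0
    let h := hw.1
    let w := hw.2
    let result := newGridV161 h w 0
    (List.range h).foldl (fun result r =>
      (List.range w).foldl (fun result c =>
        let vals := (grids.filter (fun g => decide (r < g.length) && decide (c < (g.headD []).length))).map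
          (fun g => (g.getD r []).getD c 0)
        result.modify r (fun row => row.set c (match vals with | [] => 0 | x :: xs => xs.foldl max x))) result) result

-- ===== PORT B =====
def merge_max_alt (grids : List (List (List Int))) : List (List Int) :=
  match grids with
  | [] => [[]]
  | g0 :: _ =>
    let h := g0.length
    let w := (g0.headD []).length
    let best : List (List (Option Int)) := List.replicate h (List.replicate w (none : Option Int))
    let best := grids.foldl (fun best g =>
      let rows := min h g.length
      let cols := min w (g.headD []).length
      (List.range rows).foldl (fun best r =>
        best.modify r (fun brow =>
          (List.range cols).foldl (fun brow c =>
            let v := (g.getD r []).getD c 0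
            match brow.getD c none with
            | none => brow.set c (some v)
            | some o => if v > o then brow.set c (some v) else brow) brow)) best) best
    best.map (fun row => row.map (fun x => x.getD 0))

-- ===== PRECONDITION & SPEC =====
-- Pre_ excludes exactly the ragged inputs on which Python A raises IndexError: a grid g
-- whose row r (within the merged bounds) is shorter than the `len(g[0])` bound used by
-- the comprehension's guard, so `g[r][c]` is out of range.
def Pre_merge_max (grids : List (List (List Int))) : Prop :=
  ∀ g ∈ grids, ∀ r < min (grids.headD []).length g.length,
    ∀ c < min ((grids.headD []).headD []).length (g.headD []).length,
      c < (g.getD r []).length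
instance (grids : List (List (List Int))) : Decidable (Pre_merge_max grids) := by
  unfold Pre_merge_max; infer_instance

def pvWitness_merge_max : List (List (List Int)) := [[[1, 2], [3, 4]], [[5]]]

def Spec_merge_max (grids : List (List (List Int))) (out : List (List Int)) : Prop := out = merge_max_alt grids
instance (grids : List (List (List Int))) (out : List (List Int)) : Decidable (Spec_merge_max grids out) := by unfold Spec_merge_max; infer_instance

-- ===== CLAIM (what is proved, stated in full; the proofs are below) =====
def Claim_equal_merge_max : Prop := ∀ (grids : List (List (List Int))), Dom_merge_max grids → Pre_merge_max grids → Spec_merge_max grids (merge_max grids)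

-- ===== LEMMAS AND PROOFS =====

-- proof-side vocabulary
def pvQ (g : List (List Int)) (r c : Nat) : Bool := decide (r < g.length) && decide (c < (g.headD []).length)
def pvRead (g : List (List Int)) (r c : Nat) : Int := (g.getD r []).getD c 0
def pvVals (grids : List (List (List Int))) (r c : Nat) : List Int :=
  (grids.filter (fun g => pvQ g r c)).map (fun g => pvRead g r c)
def pvOcell (grids : List (List (List Int))) (r c : Nat) : Option Int :=
  match pvVals grids r c with | [] => none | x :: xs => some (xs.foldl max x)
def pvCell (grids : List (List (List Int))) (r c : Nat) : Int := (pvOcell grids r c).getD 0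
def pvTab {α : Type} (h w : Nat) (F : Nat → Nat → α) : List (List α) :=
  (List.range h).map (fun r => (List.range w).map (F r))
-- the body of B's per-grid sweep, verbatim
def pvStepB (h w : Nat) (g : List (List Int)) (best : List (List (Option Int))) : List (List (Option Int)) :=
  let rows := min h g.length
  let cols := min w (g.headD []).length
  (List.range rows).foldl (fun best r =>
    best.modify r (fun brow =>
      (List.range cols).foldl (fun brow c =>
        let v := (g.getD r []).getD c 0
        match brow.getD c none with
        | none => brow.set c (some v)
        | some o => if v > o then brow.set c (some v) else brow) brow)) best

theorem pv_getD_map_range {α : Type} (w c : Nat) (F : Nat → α) (d : α) (hc : c < w) :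
    ((List.range w).map F).getD c d = F c := by
  rw [List.getD_eq_getElem _ _ (by simpa using hc)]
  simp

theorem pv_modify_eq_set_getD {α : Type} (l : List α) (i : Nat) (f : α → α) (d : α)
    (h : i < l.length) : l.modify i f = l.set i (f (l.getD i d)) := by
  apply List.ext_getElem
  · simp
  · intro j h1 h2
    rw [List.getElem_modify, List.getElem_set]
    by_cases hij : i = j
    · subst hij
      rw [if_pos rfl, if_pos rfl]
      congr 1
      exact (List.getD_eq_getElem _ _ h).symm
    · simp [hij]

-- a fold over range n that, at each index c, sets cell c from its own old value,
-- tabulates f over the original row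
theorem pv_fold_update_spec {α : Type} (U : Nat → List α → List α) (f : Nat → α → α) (d : α)
    (hU : ∀ c (row : List α), c < row.length → U c row = row.set c (f c (row.getD c d))) :
    ∀ (n : Nat) (row : List α), n ≤ row.length →
    (List.range n).foldl (fun row c => U c row) row
      = (List.range n).map (fun c => f c (row.getD c d)) ++ row.drop n := by
  intro n
  induction n with
  | zero => intro row _; simp
  | succ n ih =>
    intro row hn
    rw [List.range_succ, List.foldl_append, ih row (by omega)]
    simp only [List.foldl_cons, List.foldl_nil]
    have hrow : n < row.length := by omega
    have hLlen : ((List.range n).map (fun c => f c (row.getD c d))).length = n := by simp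
    have hlen : (((List.range n).map (fun c => f c (row.getD c d))) ++ row.drop n).length = row.length := by
      simp; omega
    have hget : (((List.range n).map (fun c => f c (row.getD c d))) ++ row.drop n).getD n d
        = row.getD n d := by
      rw [List.getD_eq_getElem _ _ (by omega), List.getElem_append_right (by omega),
        List.getD_eq_getElem _ _ hrow]
      simp [List.getElem_drop]
    rw [hU n _ (by omega), hget, List.set_append]
    rw [if_neg (by omega)]
    rw [hLlen, Nat.sub_self, List.drop_eq_getElem_cons hrow, List.set_cons_zero]
    simp

theorem pv_fold_modify_spec {α : Type} (G : Nat → α → α) (d : α) (n : Nat) (res : List α)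
    (hn : n ≤ res.length) :
    (List.range n).foldl (fun res r => res.modify r (G r)) res
      = (List.range n).map (fun r => G r (res.getD r d)) ++ res.drop n :=
  pv_fold_update_spec (fun r res => res.modify r (G r)) G d
    (fun r res h => pv_modify_eq_set_getD res r (G r) d h) n res hn

theorem pv_modify_modify {α : Type} (l : List α) (i : Nat) (f g : α → α) :
    (l.modify i f).modify i g = l.modify i (fun x => g (f x)) := by
  apply List.ext_getElem
  · simp
  · intro j h1 h2
    simp only [List.getElem_modify]
    by_cases hij : i = j <;> simp [hij]

theorem pv_modify_id {α : Type} (l : List α) (i : Nat) :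
    l.modify i (fun x => x) = l := by
  apply List.ext_getElem
  · simp
  · intro j h1 h2
    simp only [List.getElem_modify]
    by_cases hij : i = j <;> simp [hij]

theorem pv_fold_modify_comm {α : Type} (r : Nat) (F : Nat → α → α) :
    ∀ (cs : List Nat) (res : List α),
      cs.foldl (fun res c => res.modify r (F c)) res
        = res.modify r (fun x => cs.foldl (fun x c => F c x) x) := by
  intro cs
  induction cs with
  | nil => intro res; simp [pv_modify_id]
  | cons c cs ih =>
    intro res
    rw [List.foldl_cons, ih, pv_modify_modify]
    rfl

theorem pv_cell_match (grids : List (List (List Int))) (r c : Nat) :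
    (match pvVals grids r c with | [] => 0 | x :: xs => xs.foldl max x) = pvCell grids r c := by
  unfold pvCell pvOcell
  cases pvVals grids r c <;> simp

theorem pv_vals_append (gs : List (List (List Int))) (g : List (List Int)) (r c : Nat) :
    pvVals (gs ++ [g]) r c
      = pvVals gs r c ++ (if pvQ g r c then [pvRead g r c] else []) := by
  unfold pvVals
  rw [List.filter_append, List.map_append]
  cases h : pvQ g r c <;> simp [List.filter, h]

theorem pv_max_if (o v : Int) : max o v = if v > o then v else o := by
  rw [max_def]; split_ifs <;> omega

theorem pv_ocell_append_true (gs : List (List (List Int))) (g : List (List Int)) (r c : Nat)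
    (hq : pvQ g r c = true) :
    pvOcell (gs ++ [g]) r c
      = (match pvOcell gs r c with
         | none => some (pvRead g r c)
         | some o => some (if pvRead g r c > o then pvRead g r c else o)) := by
  unfold pvOcell
  rw [pv_vals_append, if_pos hq]
  cases hv : pvVals gs r c with
  | nil => simp
  | cons x xs => simp [List.foldl_append, pv_max_if]

theorem pv_ocell_append_false (gs : List (List (List Int))) (g : List (List Int)) (r c : Nat)
    (hq : pvQ g r c = false) :
    pvOcell (gs ++ [g]) r c = pvOcell gs r c := by
  unfold pvOcell
  rw [pv_vals_append, if_neg (by simp [hq])]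
  simp

theorem pv_stepB_tab (h w : Nat) (g : List (List Int)) (gs : List (List (List Int))) :
    pvStepB h w g (pvTab h w (pvOcell gs)) = pvTab h w (pvOcell (gs ++ [g])) := by
  unfold pvStepB
  have htablen : (pvTab h w (pvOcell gs)).length = h := by simp [pvTab]
  rw [pv_fold_modify_spec _ ([]) (min h g.length) _ (by rw [htablen]; omega)]
  apply List.ext_getElem
  · simp [pvTab]
  · intro r h1 h2
    have hrh : r < h := by simpa [pvTab] using h2
    have htabget : ∀ i, i < h → (pvTab h w (pvOcell gs)).getD i [] = (List.range w).map (pvOcell gs i) := by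
      intro i hi
      exact pv_getD_map_range h i _ [] hi
    by_cases hr : r < min h g.length
    · rw [List.getElem_append_left (by simp only [List.length_map, List.length_range]; omega)]
      simp only [List.getElem_map, List.getElem_range]
      rw [htabget r hrh]
      have hrg : r < g.length := by omega
      -- characterize the inner fold
      rw [pv_fold_update_spec
            (fun c brow =>
              let v := (g.getD r []).getD c 0
              match brow.getD c none with
              | none => brow.set c (some v)
              | some o => if v > o then brow.set c (some v) else brow)
            (fun c old =>
              match old with
              | none => some ((g.getD r []).getD c 0)
              | some o => if (g.getD r []).getD c 0 > o then some ((g.getD r []).getD c 0) else some o)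
            none
            (by
              intro c row hc
              cases hcell : row.getD c none with
              | none => simp only [hcell]
              | some o =>
                simp only [hcell]
                by_cases hv : (g.getD r []).getD c 0 > o
                · rw [if_pos hv, if_pos hv]
                · rw [if_neg hv, if_neg hv]
                  have hco : row[c] = some o := by
                    rw [← List.getD_eq_getElem row none hc]; exact hcell
                  conv_lhs => rw [← List.set_getElem_self hc]
                  rw [hco])
            (min w (g.headD []).length) _ (by simp)]
      simp only [pvTab, List.getElem_map, List.getElem_range]
      apply List.ext_getElem
      · simp
      · intro c hc1 hc2
        have hcw : c < w := by simpa using hc2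
        by_cases hcc : c < min w (g.headD []).length
        · rw [List.getElem_append_left (by simp only [List.length_map, List.length_range]; omega)]
          simp only [List.getElem_map, List.getElem_range]
          have hq : pvQ g r c = true := by
            have hx : c < (g.headD []).length := by omega
            rw [List.headD_eq_head?_getD] at hx
            unfold pvQ; simp [hrg, hx]
          rw [pv_getD_map_range w c _ none hcw,
            pv_ocell_append_true gs g r c hq]
          cases pvOcell gs r c with
          | none => simp [pvRead]
          | some o =>
            simp only [pvRead]
            split_ifs <;> rfl
        · rw [List.getElem_append_right (by simp only [List.length_map, List.length_range]; omega)]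
          simp only [List.length_map, List.length_range, List.getElem_drop, List.getElem_map,
            List.getElem_range]
          have hidx : min w (g.headD []).length + (c - min w (g.headD []).length) = c := by omega
          rw [hidx]
          have hq : pvQ g r c = false := by
            have hx : ¬ c < (g.headD []).length := by omega
            rw [List.headD_eq_head?_getD] at hx
            unfold pvQ; simp [hx]
          exact (pv_ocell_append_false gs g r c hq).symm
    · rw [List.getElem_append_right (by simp only [List.length_map, List.length_range]; omega)]
      simp only [List.length_map, List.length_range, List.getElem_drop, pvTab, List.getElem_map,
        List.getElem_range]
      have hidx : min h g.length + (r - min h g.length) = r := by omega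
      rw [hidx]
      apply List.map_congr_left
      intro c _
      have hq : pvQ g r c = false := by
        have hx : ¬ r < g.length := by omega
        unfold pvQ; simp [hx]
      exact (pv_ocell_append_false gs g r c hq).symm

theorem pv_foldB (h w : Nat) :
    ∀ (rest gs : List (List (List Int))),
      rest.foldl (fun best g => pvStepB h w g best) (pvTab h w (pvOcell gs))
        = pvTab h w (pvOcell (gs ++ rest)) := by
  intro rest
  induction rest with
  | nil => intro gs; simp
  | cons g rest ih =>
    intro gs
    rw [List.foldl_cons, pv_stepB_tab, ih (gs ++ [g])]
    simp

theorem pv_merge_max_eq_tab (g0 : List (List Int)) (gs : List (List (List Int))) :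
    merge_max (g0 :: gs) = pvTab g0.length (g0.headD []).length (pvCell (g0 :: gs)) := by
  cases g0 with
  | nil => simp [merge_max, gridShapeV161, newGridV161, pvTab]
  | cons r0 g0t =>
    show (List.range (r0 :: g0t).length).foldl _ (newGridV161 (r0 :: g0t).length r0.length 0) = _
    unfold newGridV161
    simp only [gridShapeV161, List.headD_cons]
    simp only [pv_fold_modify_comm]
    rw [pv_fold_modify_spec _ ([]) _ _ (by simp)]
    rw [List.drop_eq_nil_of_le (by simp), List.append_nil]
    unfold pvTab
    apply List.map_congr_left
    intro r hr
    rw [List.mem_range] at hr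
    rw [pv_getD_map_range _ r _ [] hr]
    rw [pv_fold_update_spec _
          (fun c _ => (match ((((r0 :: g0t) :: gs).filter
              (fun g => decide (r < g.length) && decide (c < (g.headD []).length))).map
              (fun g => (g.getD r []).getD c 0)) with
            | [] => (0 : Int) | x :: xs => xs.foldl max x))
          (0 : Int) (fun c row hc => rfl) r0.length _ (by simp)]
    rw [List.drop_eq_nil_of_le (by simp), List.append_nil]
    apply List.map_congr_left
    intro c _
    exact pv_cell_match ((r0 :: g0t) :: gs) r c

theorem pv_merge_max_alt_eq_tab (g0 : List (List Int)) (gs : List (List (List Int))) :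
    merge_max_alt (g0 :: gs) = pvTab g0.length (g0.headD []).length (pvCell (g0 :: gs)) := by
  have h0 : (List.replicate g0.length (List.replicate (g0.headD []).length (none : Option Int)))
      = pvTab g0.length (g0.headD []).length (pvOcell ([] : List (List (List Int)))) := by
    unfold pvTab pvOcell pvVals
    simp
  show (((g0 :: gs).foldl (fun best g => pvStepB g0.length (g0.headD []).length g best)
      (List.replicate g0.length (List.replicate (g0.headD []).length (none : Option Int)))).map
      (fun row => row.map (fun x => x.getD 0))) = _
  rw [h0, pv_foldB g0.length (g0.headD []).length (g0 :: gs) []]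
  simp only [List.nil_append]
  unfold pvTab pvCell
  simp [List.map_map, Function.comp]

-- ===== VERDICT (by name: the statement is the Claim_ definition above) =====
theorem merge_max_spec : Claim_equal_merge_max := by
  unfold Claim_equal_merge_max Spec_merge_max
  intro grids _ _
  cases grids with
  | nil => rfl
  | cons g0 gs => rw [pv_merge_max_eq_tab, pv_merge_max_alt_eq_tab]
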